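-- pv_equiv track=rewrite | github.com/guzhuofan/AODMP_NP_RNP | NP/NP.py | compute_np
-- ===== SOURCE A (Python) =====
-- import bisect
--
-- def compute_np(path, od_pairs):
--     """
--     NP算法实现（时间复杂度O(n² + m log m)）
--     """
--     node_indices = {node: i for i, node in enumerate(path)}
--     valid_od = set()
--     od_positions = []
--
--     # 预处理有效OD对,即起点终点均在路径上的,这时OD对的路径才有可能是path的子路径
--     for (o, d) in od_pairs:
--         if o in node_indices and d in node_indices:
--             s, t = node_indices[o], node_indices[d]
--             if s < t:
--                 # 有效OD对集合中是起点终点在path中,且起点终点方向和path方向相同的OD对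
--                 valid_od.add((path[s], path[t]))
--                 od_positions.append((s, t))
--
--     # 按起点排序OD对
--     od_positions.sort(key=lambda x: (x[0], x[1]))
--     start_positions = [x[0] for x in od_positions]
--
--     candidate_subpaths = []
--     n = len(path)
--
--     # 筛选出所有不包含其他有效 OD 对的子路径
--     for i in range(n):
--         for j in range(i+1, n):
--             # 每次循环会生成一个子路径,循环完会生成所有情况的子路径
--             # 生成的子路径,令子路径起点为origin,终点为dest
--             origin, dest = path[i], path[j]
--             # 子路径起点和终点构成的 OD 对必须有效,不然直接排除
--             if (origin, dest) not in valid_od: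
--                 continue
--
--             # 现保证子路径内部不能包含其他有效 OD 对
--
--             # 在start_positions找到第一个大于等于i的元素的索引,
--             left = bisect.bisect_left(start_positions, i)
--             # 在start_positions找到第一个严格大于j-1的元素的索引,这个索引左边的元素就都是小于等于j-1的,就是重合的OD对
--             right = bisect.bisect_right(start_positions, j-1)
--
--             has_internal = False
--             for k in range(left, right):
--                 # [left,right)代表的索引,对应所有起点在这个子路径内的OD对
--                 s, t = od_positions[k]
--                 if (s > i and t <= j) or (s == i and t < j):
--                     # 候选子路径需满足：除自身OD对外，子路径范围内不存在其他有效OD对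
--                     # 严格内部判断
--                     has_internal = True
--                     break
--
--             if not has_internal:
--                 candidate_subpaths.append( (i, j) )
--
--     # 贪心算法
--     if not candidate_subpaths:
--         return 0
--
--     sorted_subpaths = sorted(candidate_subpaths, key=lambda x: x[1])
--     last_end = -1
--     count = 0
--
--     for start, end in sorted_subpaths:
--         if start >= last_end:
--             count += 1
--             last_end = end
--
--     return count
-- ===== SOURCE B (Python) =====
-- def compute_np(path, od_pairs):
--     # Same preprocessing; then one fused scan in (end, start) order replaces
--     # candidate collection + bisect window test + sort + greedy pass.
--     node_indices = {node: i for i, node in enumerate(path)}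
--     valid_od = set()
--     od_list = []
--     for (o, d) in od_pairs:
--         if o in node_indices and d in node_indices:
--             s, t = node_indices[o], node_indices[d]
--             if s < t:
--                 valid_od.add((path[s], path[t]))
--                 od_list.append((s, t))
--
--     count = 0
--     last_end = -1
--     # enumerating (i, j) with j outer is already the greedy's processing order,
--     # so no candidate list and no sort are needed
--     for j in range(len(path)):
--         for i in range(j):
--             if i >= last_end and (path[i], path[j]) in valid_od and not any(
--                     (s > i and t <= j) or (s == i and t < j) for (s, t) in od_list):
--                 count += 1
--                 last_end = j
--     return count
-- ===== Notes on version B (the rewrite author's own statement) =====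
-- stated objective: simpler
-- what changed: B keeps A's preprocessing but replaces A's four-stage pipeline (collect all candidate (i,j) pairs with a bisect-narrowed window test, sort the candidates by end, then a separate greedy pass) with a single fused scan that enumerates pairs with the end index outermost -- that order is already the greedy's processing order, so the candidate list, the bisect index, and the sort all disappear.
import Mathlib
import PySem

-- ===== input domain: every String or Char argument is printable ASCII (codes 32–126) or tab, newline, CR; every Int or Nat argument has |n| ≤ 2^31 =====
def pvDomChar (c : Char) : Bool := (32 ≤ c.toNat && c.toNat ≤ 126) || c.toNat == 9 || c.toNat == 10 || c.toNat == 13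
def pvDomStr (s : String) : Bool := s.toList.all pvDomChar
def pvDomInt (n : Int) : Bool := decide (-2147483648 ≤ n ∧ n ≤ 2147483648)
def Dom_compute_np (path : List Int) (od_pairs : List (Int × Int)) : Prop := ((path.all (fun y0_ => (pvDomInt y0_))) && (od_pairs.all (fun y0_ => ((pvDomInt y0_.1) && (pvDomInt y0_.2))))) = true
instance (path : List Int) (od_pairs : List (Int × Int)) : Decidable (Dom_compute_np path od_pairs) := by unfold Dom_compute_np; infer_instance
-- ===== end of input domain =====

-- B (compute_np_alt) keeps A's preprocessing but fuses candidate search and greedy into one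
-- end-outermost scan, dropping A's candidate list, bisect window and sort: simpler, same results.


-- ===== PORT A =====
-- node_indices = {node: i for i, node in enumerate(path)}; then the loop over od_pairs
-- building valid_od (a set) and od_positions.  path[s]/path[t]/od_positions[k] are always
-- in range where evaluated, so pyGetD is exact there.
def aPrep (path : List Int) (od_pairs : List (Int × Int)) :
    PySem.Set (Int × Int) × List (Int × Int) :=
  let node_indices :=
    (PySem.List.enumerate path 0).foldl (fun d p => d.insert p.2 p.1) PySem.Dict.empty
  od_pairs.foldl (fun st p =>
    if node_indices.contains p.1 && node_indices.contains p.2 then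
      let s := node_indices.getD p.1 0
      let t := node_indices.getD p.2 0
      if s < t then
        (PySem.Set.add st.1 (PySem.List.pyGetD path s 0, PySem.List.pyGetD path t 0),
         st.2 ++ [(s, t)])
      else st
    else st) ([], [])

-- (s > i and t <= j) or (s == i and t < j)
def aCond (i j : Int) (p : Int × Int) : Bool :=
  (decide (p.1 > i) && decide (p.2 ≤ j)) || (p.1 == i && decide (p.2 < j))

def compute_np (path : List Int) (od_pairs : List (Int × Int)) : Int :=
  let st := aPrep path od_pairs
  let valid_od := st.1
  let od_positions := PySem.List.sorted2 st.2 (·.1) (·.2)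
  let start_positions := od_positions.map (·.1)
  let n : Int := PySem.List.len path
  let candidate_subpaths :=
    (PySem.List.pyRange 0 n 1).foldl (fun cands i =>
      (PySem.List.pyRange (i + 1) n 1).foldl (fun cands j =>
        let origin := PySem.List.pyGetD path i 0
        let dest := PySem.List.pyGetD path j 0
        if !(PySem.Set.contains valid_od (origin, dest)) then cands
        else
          let left : Int := PySem.List.bisectLeft start_positions i
          let right : Int := PySem.List.bisectRight start_positions (j - 1)
          -- 'for k in range(left, right): … break' computing a flag = any
          let has_internal := (PySem.List.pyRange left right 1).any (fun k =>
            aCond i j (PySem.List.pyGetD od_positions k (0, 0)))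
          if has_internal then cands else cands ++ [(i, j)]) cands) ([] : List (Int × Int))
  if candidate_subpaths = [] then 0
  else
    let sorted_subpaths := PySem.List.sorted candidate_subpaths (·.2) false
    (sorted_subpaths.foldl (fun (st : Int × Int) p =>
        if decide (p.1 ≥ st.1) then (p.2, st.2 + 1) else st) (-1, 0)).2

-- ===== PORT B =====
-- same preprocessing as A (identical Python lines), then one fused (j, i) scan
def bPrep (path : List Int) (od_pairs : List (Int × Int)) :
    PySem.Set (Int × Int) × List (Int × Int) :=
  let node_indices :=
    (PySem.List.enumerate path 0).foldl (fun d p => d.insert p.2 p.1) PySem.Dict.empty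
  od_pairs.foldl (fun st p =>
    if node_indices.contains p.1 && node_indices.contains p.2 then
      let s := node_indices.getD p.1 0
      let t := node_indices.getD p.2 0
      if s < t then
        (PySem.Set.add st.1 (PySem.List.pyGetD path s 0, PySem.List.pyGetD path t 0),
         st.2 ++ [(s, t)])
      else st
    else st) ([], [])

def bCond (i j : Int) (p : Int × Int) : Bool :=
  (decide (p.1 > i) && decide (p.2 ≤ j)) || (p.1 == i && decide (p.2 < j))

def compute_np_alt (path : List Int) (od_pairs : List (Int × Int)) : Int :=
  let st := bPrep path od_pairs
  let valid_od := st.1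
  let od_list := st.2
  let n : Int := PySem.List.len path
  -- state (count, last_end)
  ((PySem.List.pyRange 0 n 1).foldl (fun acc j =>
      (PySem.List.pyRange 0 j 1).foldl (fun (acc : Int × Int) i =>
        if decide (i ≥ acc.2) &&
           PySem.Set.contains valid_od
             (PySem.List.pyGetD path i 0, PySem.List.pyGetD path j 0) &&
           !(od_list.any (bCond i j))
        then (acc.1 + 1, j) else acc) acc) ((0 : Int), (-1 : Int))).1

-- ===== PRECONDITION & SPEC =====
def Spec_compute_np (path : List Int) (od_pairs : List (Int × Int)) (out : Int) : Prop := out = compute_np_alt path od_pairs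
instance (path : List Int) (od_pairs : List (Int × Int)) (out : Int) : Decidable (Spec_compute_np path od_pairs out) := by unfold Spec_compute_np; infer_instance

-- ===== CLAIM (what is proved, stated in full; the proofs are below) =====
def Claim_equal_compute_np : Prop := ∀ (path : List Int) (od_pairs : List (Int × Int)), Dom_compute_np path od_pairs → Spec_compute_np path od_pairs (compute_np path od_pairs)

-- ===== LEMMAS AND PROOFS =====

-- abbreviations for the proofs (proof-only; not used by the claim)
def npIsCand (path : List Int) (V M : List (Int × Int)) (i j : Int) : Bool :=
  PySem.Set.contains V (PySem.List.pyGetD path i 0, PySem.List.pyGetD path j 0)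
    && !(M.any (aCond i j))

def npCandA (path : List Int) (V M : List (Int × Int)) (n : Int) : List (Int × Int) :=
  (PySem.List.pyRange 0 n 1).flatMap (fun i =>
    ((PySem.List.pyRange (i + 1) n 1).filter (fun j => npIsCand path V M i j)).map
      (fun j => (i, j)))

def npCandB (path : List Int) (V M : List (Int × Int)) (n : Int) : List (Int × Int) :=
  (PySem.List.pyRange 0 n 1).flatMap (fun j =>
    ((PySem.List.pyRange 0 j 1).filter (fun i => npIsCand path V M i j)).map
      (fun i => (i, j)))

def npGstep (st p : Int × Int) : Int × Int :=
  if decide (st.2 ≤ p.1) then (st.1 + 1, p.2) else st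

-- the lexicographic "before" test used by sorted2 on pairs of ints
def npLex (a b : Int × Int) : Bool :=
  decide (a.1 < b.1) || (!decide (b.1 < a.1) && decide (a.2 < b.2))

-- 1. every element recorded in od_positions satisfies s < t
theorem prep_aux (path : List Int) (ni : PySem.Dict Int Int) (l : List (Int × Int))
    (init : PySem.Set (Int × Int) × List (Int × Int)) (h : ∀ p ∈ init.2, p.1 < p.2) :
    ∀ p ∈ (l.foldl (fun st p =>
      if ni.contains p.1 && ni.contains p.2 then
        let s := ni.getD p.1 0
        let t := ni.getD p.2 0
        if s < t then
          (PySem.Set.add st.1 (PySem.List.pyGetD path s 0, PySem.List.pyGetD path t 0),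
           st.2 ++ [(s, t)])
        else st
      else st) init).2, p.1 < p.2 := by
  induction l generalizing init with
  | nil => exact h
  | cons q l ih =>
    simp only [List.foldl_cons]
    apply ih
    by_cases h1 : (ni.contains q.1 && ni.contains q.2) = true
    · simp only [h1, if_pos]
      by_cases h2 : ni.getD q.1 0 < ni.getD q.2 0
      · simp only [if_pos h2]
        intro p hp
        rcases List.mem_append.mp hp with hp | hp
        · exact h p hp
        · simp at hp; subst hp; exact h2
      · simpa [h2] using h
    · simpa [h1] using h

theorem prep_snd_lt (path : List Int) (od_pairs : List (Int × Int)) :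
    ∀ p ∈ (aPrep path od_pairs).2, p.1 < p.2 := by
  apply prep_aux
  simp

-- 2. generic: insertion sort by a transitive asymmetric boolean test is pairwise ordered
theorem pairwise_insertBy {α : Type} (lt : α → α → Bool)
    (hasym : ∀ a b, lt a b = true → lt b a = false)
    (htrans : ∀ a b c, lt a b = true → lt b c = true → lt a c = true)
    (x : α) (acc : List α) (h : acc.Pairwise (fun a b => lt b a = false)) :
    (PySem.List.insertBy lt x acc).Pairwise (fun a b => lt b a = false) := by
  induction acc with
  | nil => simp [PySem.List.insertBy]
  | cons y ys ih =>
    rcases List.pairwise_cons.mp h with ⟨hy, hys⟩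
    by_cases hxy : lt x y = true
    · simp only [PySem.List.insertBy, hxy]
      refine List.pairwise_cons.mpr ⟨?_, h⟩
      intro z hz
      rcases List.mem_cons.mp hz with rfl | hz
      · exact hasym _ _ hxy
      · by_contra hzx
        have hzx' : lt z x = true := by
          cases hzxv : lt z x with
          | false => exact absurd hzxv hzx
          | true => rfl
        have := htrans z x y hzx' hxy
        rw [hy z hz] at this
        exact Bool.false_ne_true this
    · have hxy' : lt x y = false := by
        cases hv : lt x y with
        | false => rfl
        | true => exact absurd hv hxy
      have hstep : PySem.List.insertBy lt x (y :: ys) = y :: PySem.List.insertBy lt x ys := by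
        simp [PySem.List.insertBy, hxy']
      rw [hstep]
      refine List.pairwise_cons.mpr ⟨?_, ih hys⟩
      intro z hz
      rcases (PySem.List.mem_insertBy lt x z ys).mp hz with rfl | hz
      · exact hxy'
      · exact hy z hz

theorem pairwise_foldl_insertBy {α : Type} (lt : α → α → Bool)
    (hasym : ∀ a b, lt a b = true → lt b a = false)
    (htrans : ∀ a b c, lt a b = true → lt b c = true → lt a c = true)
    (xs : List α) (acc : List α) (h : acc.Pairwise (fun a b => lt b a = false)) :
    (xs.foldl (fun acc x => PySem.List.insertBy lt x acc) acc).Pairwise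
      (fun a b => lt b a = false) := by
  induction xs generalizing acc with
  | nil => exact h
  | cons x xs ih => exact ih _ (pairwise_insertBy lt hasym htrans x acc h)

theorem sorted2_eq_foldl (M : List (Int × Int)) :
    PySem.List.sorted2 M (·.1) (·.2)
      = M.foldl (fun acc x => PySem.List.insertBy npLex x acc) [] := by
  rfl

theorem sorted2_pairwise_fst (M : List (Int × Int)) :
    (PySem.List.sorted2 M (·.1) (·.2)).Pairwise (fun a b => a.1 ≤ b.1) := by
  rw [sorted2_eq_foldl]
  have h := pairwise_foldl_insertBy npLex
    (by intro a b h; simp [npLex] at *; omega)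
    (by intro a b c h1 h2; simp [npLex] at *; omega)
    M [] (by simp)
  exact h.imp (by intro a b hab; simp [npLex] at hab; omega)

-- 3. generic: inserting between a prefix that is not after x and a suffix that is
theorem insertBy_append {α : Type} (lt : α → α → Bool) (x : α) (L1 L2 : List α)
    (h1 : ∀ y ∈ L1, lt x y = false)
    (h2 : ∀ y ∈ L2, lt x y = true) :
    PySem.List.insertBy lt x (L1 ++ L2) = L1 ++ x :: L2 := by
  induction L1 with
  | nil =>
    cases L2 with
    | nil => rfl
    | cons z zs =>
      have := h2 z (by simp)
      simp [PySem.List.insertBy, this]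
  | cons y ys ih =>
    have hy : lt x y = false := h1 y (by simp)
    simp only [List.cons_append, PySem.List.insertBy, hy]
    simp [ih (fun z hz => h1 z (by simp [hz]))]

-- 4. the bisect window scan of A equals a scan of the whole unsorted list
theorem window_any (M : List (Int × Int)) (i j : Int)
    (hM : ∀ p ∈ M, p.1 < p.2) (hij : i < j) :
    ((PySem.List.pyRange
        (PySem.List.bisectLeft ((PySem.List.sorted2 M (·.1) (·.2)).map (·.1)) i : Int)
        (PySem.List.bisectRight ((PySem.List.sorted2 M (·.1) (·.2)).map (·.1)) (j - 1) : Int)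
        1).any (fun k =>
          aCond i j (PySem.List.pyGetD (PySem.List.sorted2 M (·.1) (·.2)) k (0, 0))))
      = M.any (aCond i j) := by
  set SL := PySem.List.sorted2 M (·.1) (·.2) with hSL
  set SP := SL.map (·.1) with hSP
  set left := PySem.List.bisectLeft SP i with hleft
  set right := PySem.List.bisectRight SP (j - 1) with hright
  have hpw : SP.Pairwise (· ≤ ·) := by
    rw [hSP, List.pairwise_map]
    exact sorted2_pairwise_fst M
  have hperm : SL.Perm M := PySem.List.sorted2_perm M (·.1) (·.2) false
  have hlen : SP.length = SL.length := by rw [hSP, List.length_map]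
  have specl := PySem.List.bisectLeft_spec SP i hpw
  have specr := PySem.List.bisectRight_spec SP (j - 1) hpw
  have hMS : ∀ p ∈ SL, p.1 < p.2 := fun p hp => hM p (hperm.mem_iff.mp hp)
  have hbound : ∀ p ∈ SL, aCond i j p = true → i ≤ p.1 ∧ p.1 ≤ j - 1 := by
    intro p hp hc
    have := hMS p hp
    simp [aCond] at hc
    omega
  rw [Bool.eq_iff_iff]
  simp only [List.any_eq_true]
  constructor
  · rintro ⟨k, hk, hc⟩
    rw [PySem.List.mem_pyRange_one] at hk
    have hk0 : 0 ≤ k := le_trans (by positivity) hk.1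
    have hkl : k < (SL.length : Int) := by
      have h1 : k < (right : Int) := hk.2
      have h2 : (right : Int) ≤ (SL.length : Int) := by
        exact_mod_cast (hlen ▸ specr.1)
      omega
    rw [PySem.List.pyGetD_eq_getElem SL (0, 0) hk0 hkl] at hc
    exact ⟨SL[k.toNat], hperm.mem_iff.mp (List.getElem_mem _), hc⟩
  · rintro ⟨p, hp, hc⟩
    have hpS : p ∈ SL := hperm.mem_iff.mpr hp
    obtain ⟨m, hm, hpm⟩ := List.mem_iff_getElem.mp hpS
    have hmSP : m < SP.length := by omega
    have hSPm : SP[m]'hmSP = p.1 := by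
      simp only [hSP, List.getElem_map, hpm]
    have hb := hbound p hpS hc
    have h1 : left ≤ m := by
      by_contra h
      have := specl.2.1 m hmSP (by omega)
      rw [hSPm] at this
      omega
    have h2 : m < right := by
      by_contra h
      have := specr.2.2 m hmSP (by omega)
      rw [hSPm] at this
      omega
    refine ⟨(m : Int), ?_, ?_⟩
    · rw [PySem.List.mem_pyRange_one]
      exact ⟨by exact_mod_cast h1, by exact_mod_cast h2⟩
    · have : PySem.List.pyGetD SL (m : Int) (0, 0) = SL[m] := by
        rw [PySem.List.pyGetD_eq_getElem SL (0, 0) (by positivity) (by exact_mod_cast hm)]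
        simp
      rw [this, hpm]
      exact hc


-- 5. generic: a stable sort by an Int key groups the list by the keys in order
theorem sorted_snd_flatMap (xs : List (Int × Int)) (ks : List Int)
    (hks : ks.Pairwise (· < ·)) (hmem : ∀ p ∈ xs, p.2 ∈ ks) :
    PySem.List.sorted xs (·.2) false
      = ks.flatMap (fun k => xs.filter (fun p => p.2 == k)) := by
  induction xs using List.reverseRecOn with
  | nil => simp [PySem.List.sorted_eq_foldl_insertBy]
  | append_singleton xs x ih =>
    have hxs : ∀ p ∈ xs, p.2 ∈ ks := fun p hp => hmem p (by simp [hp])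
    have hx : x.2 ∈ ks := hmem x (by simp)
    have ihe := ih hxs
    rw [PySem.List.sorted_eq_foldl_insertBy] at ihe ⊢
    rw [List.foldl_append, List.foldl_cons, List.foldl_nil, ihe]
    obtain ⟨ks₁, ks₂, hsplit⟩ := List.append_of_mem hx
    subst hsplit
    have hpw := List.pairwise_append.mp hks
    have hk₁ : ∀ k ∈ ks₁, k < x.2 := fun k hk => hpw.2.2 k hk x.2 (by simp)
    have hk₂ : ∀ k ∈ ks₂, x.2 < k := (List.pairwise_cons.mp hpw.2.1).1
    set F : Int → List (Int × Int) := fun k => xs.filter (fun p => p.2 == k) with hF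
    have hmemF : ∀ k y, y ∈ F k → y.2 = k := by
      intro k y hy
      simpa using (List.mem_filter.mp hy).2
    have step : PySem.List.insertBy (fun a b => decide (a.2 < b.2)) x
        ((ks₁ ++ x.2 :: ks₂).flatMap F)
        = (ks₁.flatMap F ++ F x.2) ++ x :: ks₂.flatMap F := by
      rw [List.flatMap_append, List.flatMap_cons, ← List.append_assoc]
      apply insertBy_append
      · intro y hy
        rcases List.mem_append.mp hy with hy | hy
        · obtain ⟨k, hk, hyk⟩ := List.mem_flatMap.mp hy
          have := hmemF k y hyk
          have := hk₁ k hk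
          simp; omega
        · have := hmemF x.2 y hy
          simp; omega
      · intro y hy
        obtain ⟨k, hk, hyk⟩ := List.mem_flatMap.mp hy
        have := hmemF k y hyk
        have := hk₂ k hk
        simp; omega
    rw [step]
    have hcong₁ : ks₁.flatMap (fun k => (xs ++ [x]).filter (fun p => p.2 == k))
        = ks₁.flatMap F := by
      apply List.flatMap_congr
      intro k hk
      rw [List.filter_append]
      simp only [List.filter_cons, List.filter_nil]
      have : ¬ x.2 = k := by have := hk₁ k hk; omega
      have hb : (x.2 == k) = false := by simp [this]
      simp only [hb, Bool.false_eq_true, if_false, List.append_nil, hF]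
    have hcong₂ : ks₂.flatMap (fun k => (xs ++ [x]).filter (fun p => p.2 == k))
        = ks₂.flatMap F := by
      apply List.flatMap_congr
      intro k hk
      rw [List.filter_append]
      simp only [List.filter_cons, List.filter_nil]
      have : ¬ x.2 = k := by have := hk₂ k hk; omega
      have hb : (x.2 == k) = false := by simp [this]
      simp only [hb, Bool.false_eq_true, if_false, List.append_nil, hF]
    rw [List.flatMap_append, List.flatMap_cons, hcong₁, hcong₂]
    have hself : (xs ++ [x]).filter (fun p => p.2 == x.2) = F x.2 ++ [x] := by
      rw [List.filter_append]
      simp [hF]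
    rw [hself]
    simp [List.append_assoc]


-- 6. small helpers
theorem filter_eq_single (l : List Int) (hl : l.Pairwise (· < ·)) (j : Int) (q : Int → Bool) :
    l.filter (fun x => q x && (x == j)) = if j ∈ l ∧ q j = true then [j] else [] := by
  induction l with
  | nil => simp
  | cons x xs ih =>
    have hx : ∀ y ∈ xs, x < y := by
      intro y hy; exact (List.pairwise_cons.mp hl).1 y hy
    have ih' := ih (List.pairwise_cons.mp hl).2
    by_cases hxj : x = j
    · subst hxj
      have hnot : x ∉ xs := fun h => lt_irrefl x (hx x h)
      by_cases hq : q x = true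
      · simp [hq, ih', hnot]
      · simp [hq, ih', hnot]
    · have hfalse : ((fun x => q x && (x == j)) x) = false := by
        simp [hxj]
      have hjx : j ≠ x := fun h => hxj h.symm
      simp [hfalse, ih', hjx]

theorem map_filter_eq_flatMap {α β : Type} (l : List α) (p : α → Bool) (f : α → β) :
    (l.filter p).map f = l.flatMap (fun x => if p x then [f x] else []) := by
  induction l with
  | nil => rfl
  | cons x xs ih =>
    by_cases h : p x = true <;> simp [h, ih]

-- 7. A's candidate list, stably sorted by end, is exactly the (end, start)-ordered list
theorem sortedA_eq_candB (path : List Int) (V M : List (Int × Int)) (n : Int) :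
    PySem.List.sorted (npCandA path V M n) (·.2) false = npCandB path V M n := by
  rw [sorted_snd_flatMap (npCandA path V M n) (PySem.List.pyRange 0 n 1)
      (PySem.List.pairwise_lt_pyRange_one 0 n)]
  · -- the grouped-by-end form is exactly npCandB
    unfold npCandB
    apply List.flatMap_congr
    intro j hj
    rw [PySem.List.mem_pyRange_one] at hj
    unfold npCandA
    rw [List.filter_flatMap]
    have hblock : ∀ i : Int,
        ((((PySem.List.pyRange (i + 1) n 1).filter (fun j' => npIsCand path V M i j')).map
          (fun j' => (i, j'))).filter (fun p => p.2 == j))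
        = if j ∈ PySem.List.pyRange (i + 1) n 1 ∧ npIsCand path V M i j = true
          then [(i, j)] else [] := by
      intro i
      rw [List.filter_map, List.filter_filter]
      have hc : ∀ j' : Int,
          (((fun p : Int × Int => p.2 == j) ∘ fun j' => (i, j')) j'
            && npIsCand path V M i j')
          = (npIsCand path V M i j' && (j' == j)) := by
        intro j'
        simp [Function.comp, Bool.and_comm]
      rw [List.filter_congr (fun j' _ => hc j')]
      rw [filter_eq_single _ (PySem.List.pairwise_lt_pyRange_one _ _) j
        (fun j' => npIsCand path V M i j')]
      by_cases h : j ∈ PySem.List.pyRange (i + 1) n 1 ∧ npIsCand path V M i j = true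
      · rw [if_pos h, if_pos h]; rfl
      · rw [if_neg h, if_neg h]; rfl
    rw [List.flatMap_congr (fun i _ => hblock i)]
    rw [PySem.List.pyRange_one_append 0 j n (by omega) (by omega), List.flatMap_append]
    have h2 : (PySem.List.pyRange j n 1).flatMap
        (fun i => if j ∈ PySem.List.pyRange (i + 1) n 1 ∧ npIsCand path V M i j = true
          then [(i, j)] else []) = [] := by
      rw [List.flatMap_eq_nil_iff]
      intro i hi
      rw [PySem.List.mem_pyRange_one] at hi
      have : j ∉ PySem.List.pyRange (i + 1) n 1 := by
        rw [PySem.List.mem_pyRange_one]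
        omega
      simp [this]
    rw [h2, List.append_nil]
    rw [map_filter_eq_flatMap]
    apply List.flatMap_congr
    intro i hi
    rw [PySem.List.mem_pyRange_one] at hi
    have : j ∈ PySem.List.pyRange (i + 1) n 1 := by
      rw [PySem.List.mem_pyRange_one]
      omega
    simp [this]
  · -- every candidate's end lies in range(n)
    intro p hp
    unfold npCandA at hp
    obtain ⟨i, hi, hpb⟩ := List.mem_flatMap.mp hp
    rw [PySem.List.mem_pyRange_one] at hi
    obtain ⟨j', hj', rfl⟩ := List.mem_map.mp hpb
    have := (List.mem_filter.mp hj').1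
    rw [PySem.List.mem_pyRange_one] at this
    rw [PySem.List.mem_pyRange_one]
    constructor <;> omega


-- 8. swapping the two components of A's greedy state
theorem foldl_greedy_swap (l : List (Int × Int)) (a b : Int) :
    l.foldl (fun (st : Int × Int) p =>
        if decide (p.1 ≥ st.1) then (p.2, st.2 + 1) else st) (a, b)
      = Prod.swap (l.foldl npGstep (b, a)) := by
  induction l generalizing a b with
  | nil => rfl
  | cons p l ih =>
    simp only [List.foldl_cons, npGstep]
    by_cases h : a ≤ p.1
    · simp only [ge_iff_le, h, decide_true, if_pos]
      exact ih p.2 (b + 1)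
    · simp only [ge_iff_le, h, decide_false, Bool.false_eq_true, if_false]
      exact ih a b


-- A computes the greedy fold of candB
theorem computeA_eq_greedy (path : List Int) (od_pairs : List (Int × Int)) :
    compute_np path od_pairs
      = ((npCandB path (aPrep path od_pairs).1 (aPrep path od_pairs).2
            (PySem.List.len path)).foldl npGstep (0, -1)).1 := by
  have hM := prep_snd_lt path od_pairs
  simp only [compute_np]
  have hcand : (PySem.List.pyRange 0 (PySem.List.len path) 1).foldl (fun cands i =>
      (PySem.List.pyRange (i + 1) (PySem.List.len path) 1).foldl (fun cands j =>
        if !(PySem.Set.contains (aPrep path od_pairs).1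
              (PySem.List.pyGetD path i 0, PySem.List.pyGetD path j 0)) then cands
        else
          if (PySem.List.pyRange
                (PySem.List.bisectLeft
                  ((PySem.List.sorted2 (aPrep path od_pairs).2 (·.1) (·.2)).map (·.1)) i : Int)
                (PySem.List.bisectRight
                  ((PySem.List.sorted2 (aPrep path od_pairs).2 (·.1) (·.2)).map (·.1)) (j - 1) : Int)
                1).any (fun k =>
                  aCond i j (PySem.List.pyGetD
                    (PySem.List.sorted2 (aPrep path od_pairs).2 (·.1) (·.2)) k (0, 0)))
          then cands else cands ++ [(i, j)]) cands) ([] : List (Int × Int))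
      = npCandA path (aPrep path od_pairs).1 (aPrep path od_pairs).2 (PySem.List.len path) := by
    unfold npCandA
    rw [PySem.List.foldl_congr_mem _ _
      (fun cands i => cands ++ ((PySem.List.pyRange (i + 1) (PySem.List.len path) 1).filter
        (fun j => npIsCand path (aPrep path od_pairs).1 (aPrep path od_pairs).2 i j)).map
        (fun j => (i, j))) _ ?_]
    · exact PySem.List.foldl_append_eq_flatMap _ _ _
    · intro cands i _
      beta_reduce
      rw [← PySem.List.foldl_append_if]
      apply PySem.List.foldl_congr_mem
      intro acc j hj
      rw [PySem.List.mem_pyRange_one] at hj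
      rw [window_any (aPrep path od_pairs).2 i j hM (by omega)]
      simp only [npIsCand]
      by_cases hc : PySem.Set.contains (aPrep path od_pairs).1
          (PySem.List.pyGetD path i 0, PySem.List.pyGetD path j 0) = true <;>
        by_cases ha : ((aPrep path od_pairs).2.any (aCond i j)) = true <;>
        simp [ha]
  rw [hcand, ← sortedA_eq_candB]
  by_cases h : npCandA path (aPrep path od_pairs).1 (aPrep path od_pairs).2
      (PySem.List.len path) = []
  · rw [if_pos h, h]
    rfl
  · rw [if_neg h, foldl_greedy_swap]
    rfl


-- B computes the same greedy fold of candB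
theorem computeB_eq_greedy (path : List Int) (od_pairs : List (Int × Int)) :
    compute_np_alt path od_pairs
      = ((npCandB path (aPrep path od_pairs).1 (aPrep path od_pairs).2
            (PySem.List.len path)).foldl npGstep (0, -1)).1 := by
  have hprep : bPrep path od_pairs = aPrep path od_pairs := rfl
  simp only [compute_np_alt, hprep, npCandB]
  rw [List.foldl_flatMap]
  congr 1
  apply PySem.List.foldl_congr_mem
  intro acc j _
  rw [List.foldl_map, ← PySem.List.foldl_if_eq_foldl_filter]
  apply PySem.List.foldl_congr_mem
  intro st i _
  rw [show bCond = aCond from rfl]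
  simp only [npIsCand, npGstep, ge_iff_le]
  by_cases hd : decide (st.2 ≤ i) = true <;>
    by_cases hc1 : List.contains (aPrep path od_pairs).1
        (PySem.List.pyGetD path i 0, PySem.List.pyGetD path j 0) = true <;>
    by_cases hc2 : ((aPrep path od_pairs).2.any (aCond i j)) = true <;>
    simp [PySem.Set.contains, hd, hc2]


-- ===== VERDICT (by name: the statement is the Claim_ definition above) =====
theorem compute_np_spec : Claim_equal_compute_np := by
  intro path od_pairs _
  unfold Spec_compute_np
  rw [computeA_eq_greedy, computeB_eq_greedy]
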